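-- pv_equiv track=rewrite | github.com/PentHertz/urh-ng | src/urh/awre/ProtocolMatcher.py | _find_pwm_data_start
-- ===== SOURCE A (Python) =====
-- def _find_pwm_data_start(bits: str) -> int:
--     """
--     Find where the actual data starts in a RAW bit string,
--     skipping preamble (alternating), gap (zeros), and any
--     framing/guard bits before the clean PWM data.
--
--     Clean PWM data has a consistent period (H+L) per bit,
--     typically 3 samples (Te=1). Framing bits have irregular periods.
--     """
--     if not bits:
--         return 0
--
--     # Skip leading zeros
--     i = 0
--     while i < len(bits) and bits[i] == "0":
--         i += 1
--
--     # Skip alternating preamble (round to even — preamble is always pairs)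
--     ps = i
--     while ps < len(bits) - 1:
--         if bits[ps] == bits[ps + 1]:
--             break
--         ps += 1
--     alt_len = ps - i
--     if alt_len >= 4:
--         preamble_len = alt_len + (alt_len % 2)
--         i += preamble_len
--
--     # Skip zero gap
--     while i < len(bits) and bits[i] == "0":
--         i += 1
--
--     # Build pulse pairs from here and find the most common period
--     pairs = []
--     scan = i
--     while scan < len(bits):
--         if bits[scan] != "1":
--             scan += 1
--             continue
--         hi_end = scan
--         while hi_end < len(bits) and bits[hi_end] == "1":
--             hi_end += 1
--         lo_end = hi_end
--         while lo_end < len(bits) and bits[lo_end] == "0":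
--             lo_end += 1
--         hi_len = hi_end - scan
--         lo_len = lo_end - hi_end
--         period = hi_len + lo_len
--         pairs.append((scan, hi_len, lo_len, period))
--         scan = lo_end
--
--     if len(pairs) < 4:
--         return i
--
--     # Find the most common period (= the correct PWM bit period)
--     from collections import Counter
--
--     period_counts = Counter(p for _, _, _, p in pairs)
--     dominant_period = period_counts.most_common(1)[0][0]
--
--     # Skip pairs until we find 3 consecutive ones with the dominant period
--     for j in range(len(pairs) - 2):
--         if (
--             pairs[j][3] == dominant_period
--             and pairs[j + 1][3] == dominant_period
--             and pairs[j + 2][3] == dominant_period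
--         ):
--             return pairs[j][0]
--
--     # Fallback: return first pair position
--     return pairs[0][0] if pairs else i
-- ===== SOURCE B (Python) =====
-- from itertools import groupby
-- from collections import Counter
--
--
-- def _find_pwm_data_start(bits: str) -> int:
--     # Run-length encoding: (value, length, start) per maximal run
--     runs = []
--     pos = 0
--     for v, g in groupby(bits):
--         n = sum(1 for _ in g)
--         runs.append((v, n, pos))
--         pos += n
--
--     # Leading zeros: drop one leading '0' run
--     i = 0
--     r = 0
--     if runs and runs[0][0] == "0":
--         i = runs[0][1]
--         r = 1
--
--     # Alternating preamble: it extends up to the first run of length >= 2,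
--     # or to the last character when the whole rest of the string alternates
--     ps = next((start for _, n, start in runs[r:] if n >= 2), len(bits) - 1)
--     alt_len = max(ps - i, 0)
--     if alt_len >= 4:
--         i += alt_len + alt_len % 2
--
--     # Restrict the run list to positions >= i (the run at the boundary may split)
--     tail = []
--     for v, n, start in runs:
--         if start + n <= i:
--             continue
--         if start < i:
--             tail.append((v, start + n - i, i))
--         else:
--             tail.append((v, n, start))
--
--     # Zero gap: at most one '0' run
--     if tail and tail[0][0] == "0":
--         i = tail[0][2] + tail[0][1]
--         tail = tail[1:]
--
--     # Pulse pairs: each '1' run with the '0' run that follows it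
--     pairs = []
--     k = 0
--     while k < len(tail):
--         v, n, start = tail[k]
--         if v != "1":
--             k += 1
--             continue
--         if k + 1 < len(tail) and tail[k + 1][0] == "0":
--             lo = tail[k + 1][1]
--             k += 2
--         else:
--             lo = 0
--             k += 1
--         pairs.append((start, n, lo, n + lo))
--
--     if len(pairs) < 4:
--         return i
--
--     counts = Counter(p for *_, p in pairs)
--     dominant = max(counts, key=counts.get)
--
--     for p1, p2, p3 in zip(pairs, pairs[1:], pairs[2:]):
--         if p1[3] == p2[3] == p3[3] == dominant:
--             return p1[0]
--     return pairs[0][0]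
-- ===== Notes on version B (the rewrite author's own statement) =====
-- stated objective: alternative
-- what changed: B first builds a run-length encoding of the bit string (itertools.groupby) and expresses every phase - leading-zero skip, alternating-preamble boundary (first run of length >= 2, else the last character), zero gap, pulse-pair construction - as operations on the run list, replacing A's five character-by-character index while loops.
import Mathlib
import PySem

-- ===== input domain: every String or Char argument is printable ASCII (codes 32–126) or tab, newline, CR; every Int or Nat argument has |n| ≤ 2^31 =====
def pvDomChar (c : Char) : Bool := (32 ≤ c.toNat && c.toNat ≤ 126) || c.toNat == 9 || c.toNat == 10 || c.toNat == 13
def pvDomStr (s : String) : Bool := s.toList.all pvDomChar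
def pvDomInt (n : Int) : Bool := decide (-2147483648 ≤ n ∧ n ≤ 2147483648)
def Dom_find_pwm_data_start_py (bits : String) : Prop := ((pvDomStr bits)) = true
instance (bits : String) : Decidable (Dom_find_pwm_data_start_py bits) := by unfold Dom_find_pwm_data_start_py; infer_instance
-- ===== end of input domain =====

-- B re-implements the scan via a run-length encoding (groupby) of the bit string instead of A's
-- index-based while loops; equivalence of the RETURN value is proved for every string (A is total).

-- ===== PORT A =====
-- while i < len(bits) and bits[i] == c: i += 1   (A's four skip loops share this shape)
def pvAWhileEq (c : Char) (l : List Char) (i : Nat) : Nat :=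
  if _h : i < l.length ∧ l.getD i ' ' = c then pvAWhileEq c l (i + 1) else i
termination_by l.length - i
decreasing_by omega

theorem le_pvAWhileEq (c : Char) (l : List Char) (i : Nat) : i ≤ pvAWhileEq c l i := by
  fun_induction pvAWhileEq <;> omega

-- while ps < len(bits) - 1: if bits[ps] == bits[ps+1]: break; ps += 1
def pvAPs (l : List Char) (ps : Nat) : Nat :=
  if h : ps + 1 < l.length then
    if l.getD ps ' ' = l.getD (ps + 1) ' ' then ps else pvAPs l (ps + 1)
  else ps
termination_by l.length - ps
decreasing_by omega

-- the pair-building while loop; pairs are (scan, hi_len, lo_len, period)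
def pvAPairs (l : List Char) (scan : Nat) : List (Nat × Nat × Nat × Nat) :=
  if h : scan < l.length then
    if hc : l.getD scan ' ' ≠ '1' then pvAPairs l (scan + 1)
    else
      let hiEnd := pvAWhileEq '1' l scan
      let loEnd := pvAWhileEq '0' l hiEnd
      (scan, hiEnd - scan, loEnd - hiEnd, (hiEnd - scan) + (loEnd - hiEnd)) :: pvAPairs l loEnd
  else []
termination_by l.length - scan
decreasing_by
  · omega
  · have h1 : scan + 1 ≤ pvAWhileEq '1' l scan := by
      rw [pvAWhileEq]
      simp only [not_not] at hc
      simp only [h, hc, and_self, dite_true]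
      exact le_pvAWhileEq '1' l (scan + 1)
    have h2 := le_pvAWhileEq '0' l (pvAWhileEq '1' l scan)
    omega

-- Counter(...).most_common(1)[0][0]: first key (insertion order) with maximal count
def pvAMostCommon (d : PySem.Dict Nat Int) : Nat :=
  match d.items with
  | [] => 0
  | it :: rest => (rest.foldl (fun best kv => if kv.2 > best.2 then kv else best) it).1

-- for j in range(len(pairs) - 2): ...
def pvAFind3 (pairs : List (Nat × Nat × Nat × Nat)) (dom : Nat) (j : Nat) : Option Nat :=
  if h : j + 2 < pairs.length then
    let d0 := (0, 0, 0, 0)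
    if (pairs.getD j d0).2.2.2 = dom ∧ (pairs.getD (j+1) d0).2.2.2 = dom ∧
        (pairs.getD (j+2) d0).2.2.2 = dom then
      some (pairs.getD j d0).1
    else pvAFind3 pairs dom (j + 1)
  else none
termination_by pairs.length - j
decreasing_by omega

def find_pwm_data_start_py (bits : String) : Int :=
  let l := bits.toList
  if l = [] then 0
  else
    let i0 := pvAWhileEq '0' l 0
    let ps := pvAPs l i0
    let altLen := ps - i0
    let i1 := if altLen ≥ 4 then i0 + (altLen + altLen % 2) else i0
    let i2 := pvAWhileEq '0' l i1
    let pairs := pvAPairs l i2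
    if pairs.length < 4 then (i2 : Int)
    else
      let counts := PySem.Dict.counter (pairs.map (fun p => p.2.2.2))
      let dom := pvAMostCommon counts
      match pvAFind3 pairs dom 0 with
      | some r => (r : Int)
      | none =>
        match pairs.head? with
        | some p => (p.1 : Int)
        | none => (i2 : Int)

-- ===== PORT B =====
-- run-length encoding via groupby: (value, length, start) per maximal run
def pvRuns (l : List Char) (s : Nat) : List (Char × Nat × Nat) :=
  match l with
  | [] => []
  | c :: t =>
    let k := (t.takeWhile (· == c)).length
    (c, k + 1, s) :: pvRuns (t.drop k) (s + (k + 1))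
termination_by l.length
decreasing_by simp

-- next((start for _, n, start in runs if n >= 2), d)
def pvFirstBig (runs : List (Char × Nat × Nat)) (d : Int) : Int :=
  match runs with
  | [] => d
  | (_, len, st) :: rest => if 2 ≤ len then (st : Int) else pvFirstBig rest d

-- restrict the run list to positions >= i (the run at the boundary may split)
def pvTrim (runs : List (Char × Nat × Nat)) (i : Nat) : List (Char × Nat × Nat) :=
  match runs with
  | [] => []
  | (v, len, st) :: rest =>
    if st + len ≤ i then pvTrim rest i
    else if st < i then (v, st + len - i, i) :: pvTrim rest i
    else (v, len, st) :: pvTrim rest i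

-- each '1' run paired with an immediately following '0' run
def pvBPairs (runs : List (Char × Nat × Nat)) : List (Nat × Nat × Nat × Nat) :=
  match runs with
  | [] => []
  | (v, len, st) :: rest =>
    if v ≠ '1' then pvBPairs rest
    else
      match rest with
      | (v2, len2, s2) :: rest2 =>
        if v2 = '0' then (st, len, len2, len + len2) :: pvBPairs rest2
        else (st, len, 0, len) :: pvBPairs ((v2, len2, s2) :: rest2)
      | [] => [(st, len, 0, len)]
termination_by runs.length
decreasing_by all_goals simp

-- max(counts, key=counts.get): first key (iteration = insertion order) with maximal count
def pvBMax (d : PySem.Dict Nat Int) : Nat :=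
  match d.keys with
  | [] => 0
  | k0 :: ks => ks.foldl (fun best k => if d.getD k 0 > d.getD best 0 then k else best) k0

-- for p1, p2, p3 in zip(pairs, pairs[1:], pairs[2:]): ...
def pvBFind3 (pairs : List (Nat × Nat × Nat × Nat)) (dom : Nat) : Option Nat :=
  match pairs with
  | p1 :: p2 :: p3 :: rest =>
    if p1.2.2.2 = dom ∧ p2.2.2.2 = dom ∧ p3.2.2.2 = dom then some p1.1
    else pvBFind3 (p2 :: p3 :: rest) dom
  | _ => none

def find_pwm_data_start_py_alt (bits : String) : Int :=
  let l := bits.toList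
  let runs := pvRuns l 0
  let ir : Nat × Nat :=
    match runs with
    | (v, len, _) :: _ => if v = '0' then (len, 1) else (0, 0)
    | [] => (0, 0)
  let i0 := ir.1
  let rest := runs.drop ir.2
  let ps : Int := pvFirstBig rest ((l.length : Int) - 1)
  let altLen : Nat := (max (ps - (i0 : Int)) 0).toNat
  let i1 := if altLen ≥ 4 then i0 + (altLen + altLen % 2) else i0
  let tail := pvTrim runs i1
  let it : Nat × List (Char × Nat × Nat) :=
    match tail with
    | (v, len, st) :: rest2 => if v = '0' then (st + len, rest2) else (i1, tail)
    | [] => (i1, tail)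
  let i2 := it.1
  let tail2 := it.2
  let pairs := pvBPairs tail2
  if pairs.length < 4 then (i2 : Int)
  else
    let counts := PySem.Dict.counter (pairs.map (fun p => p.2.2.2))
    let dom := pvBMax counts
    match pvBFind3 pairs dom with
    | some r => (r : Int)
    | none => ((pairs.headD (0, 0, 0, 0)).1 : Int)

-- ===== PRECONDITION & SPEC =====
def Spec_find_pwm_data_start_py (bits : String) (out : Int) : Prop := out = find_pwm_data_start_py_alt bits
instance (bits : String) (out : Int) : Decidable (Spec_find_pwm_data_start_py bits out) := by unfold Spec_find_pwm_data_start_py; infer_instance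

-- ===== CLAIM (what is proved, stated in full; the proofs are below) =====
def Claim_equal_find_pwm_data_start_py : Prop := ∀ (bits : String), Dom_find_pwm_data_start_py bits → Spec_find_pwm_data_start_py bits (find_pwm_data_start_py bits)

-- ===== LEMMAS AND PROOFS =====

-- toolbox --------------------------------------------------------------
theorem pv_drop_takeWhile (p : Char → Bool) (l : List Char) :
    l.drop (l.takeWhile p).length = l.dropWhile p := by
  induction l with
  | nil => rfl
  | cons a t ih => by_cases h : p a <;> simp [h, ih]

theorem pv_head_after_tw (p : Char → Bool) (l : List Char) (x : Char) (t : List Char)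
    (h : l.drop (l.takeWhile p).length = x :: t) : ¬ p x := by
  rw [pv_drop_takeWhile] at h
  have := List.head?_dropWhile_not p l
  simp [h] at this; simp [this]

theorem pv_tw_head (c : Char) (t : List Char) (h : 1 ≤ (t.takeWhile (· == c)).length) :
    ∃ t2, t = c :: t2 := by
  cases t with
  | nil => simp at h
  | cons b t2 =>
    by_cases hb : b = c
    · exact ⟨t2, by rw [hb]⟩
    · simp [hb] at h

-- A's skip loop computes start + length of the run of c at start -------
theorem pvAWhileEq_eq (c : Char) (l : List Char) (i : Nat) :
    pvAWhileEq c l i = i + ((l.drop i).takeWhile (· == c)).length := by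
  fun_induction pvAWhileEq with
  | case1 i h ih =>
    obtain ⟨hi, hc⟩ := h
    rw [List.drop_eq_getElem_cons hi, List.getD_eq_getElem l ' ' hi] at *
    simp [hc, ih]; omega
  | case2 i h =>
    rcases Nat.lt_or_ge i l.length with hi | hi
    · have hc : l.getD i ' ' ≠ c := fun hc => h ⟨hi, hc⟩
      rw [List.drop_eq_getElem_cons hi, List.getD_eq_getElem l ' ' hi] at *
      simp [hc]
    · rw [List.drop_eq_nil_of_le hi]; simp

-- A's preamble loop ----------------------------------------------------
def pvChain : List Char → Nat
  | a :: b :: t => if a = b then 0 else pvChain (b :: t) + 1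
  | _ => 0

theorem pvAPs_eq (l : List Char) (ps : Nat) : pvAPs l ps = ps + pvChain (l.drop ps) := by
  fun_induction pvAPs with
  | case1 ps h heq =>
    have h1 : ps < l.length := by omega
    rw [List.drop_eq_getElem_cons h1, List.drop_eq_getElem_cons h]
    rw [List.getD_eq_getElem l ' ' h1, List.getD_eq_getElem l ' ' h] at heq
    simp [pvChain, heq]
  | case2 ps h hne ih =>
    have h1 : ps < l.length := by omega
    rw [List.drop_eq_getElem_cons h1, List.drop_eq_getElem_cons h]
    rw [List.getD_eq_getElem l ' ' h1, List.getD_eq_getElem l ' ' h] at hne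
    rw [List.drop_eq_getElem_cons h] at ih
    simp [pvChain, hne, ih]; omega
  | case3 ps h =>
    have : (l.drop ps).length ≤ 1 := by simp [List.length_drop]; omega
    rcases hd : l.drop ps with _ | ⟨x, _ | ⟨y, t⟩⟩ <;> simp [pvChain]
    · rw [hd] at this; simp at this

-- pvRuns basics --------------------------------------------------------
theorem pvRuns_cons (c : Char) (t : List Char) (s : Nat) :
    pvRuns (c :: t) s = (c, (t.takeWhile (· == c)).length + 1, s) ::
      pvRuns (t.drop (t.takeWhile (· == c)).length) (s + ((t.takeWhile (· == c)).length + 1)) := by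
  rw [pvRuns]

theorem pvRuns_nil (s : Nat) : pvRuns [] s = [] := by rw [pvRuns]

-- all run starts produced from anchor s lie at or after s --------------
theorem pvRuns_start_ge (l : List Char) (s : Nat) :
    ∀ x ∈ pvRuns l s, s ≤ x.2.2 := by
  fun_induction pvRuns l s with
  | case1 s => intro x hx; simp at hx
  | case2 s c t k ih =>
    intro x hx
    rcases List.mem_cons.mp hx with h | h
    · subst h; simp
    · have := ih x h
      omega

theorem pvFirstBig_ge (rs : List (Char × Nat × Nat)) (d m : Int)
    (hst : ∀ x ∈ rs, m ≤ (x.2.2 : Int)) (hd : m ≤ d) : m ≤ pvFirstBig rs d := by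
  induction rs with
  | nil => simpa [pvFirstBig]
  | cons x rest ih =>
    obtain ⟨v, len, st⟩ := x
    simp only [pvFirstBig]
    split
    · exact hst (v, len, st) (by simp)
    · exact ih (fun y hy => hst y (by simp [hy]))

-- A's transition count = distance from s to the first run of length ≥ 2,
-- defaulting to the last character, clamped at 0
theorem pvChain_firstBig (l : List Char) (s : Nat) :
    (pvChain l : Int) = max (pvFirstBig (pvRuns l s) ((s : Int) + l.length - 1) - s) 0 := by
  fun_induction pvRuns l s with
  | case1 s => simp [pvFirstBig, pvChain]
  | case2 s c t k ih =>
    have hkdef : k = (t.takeWhile (· == c)).length := rfl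
    clear_value k
    by_cases hk : k = 0
    · subst hk
      simp only [List.drop_zero] at ih ⊢
      have hfb : pvFirstBig ((c, 0 + 1, s) :: pvRuns t (s + (0 + 1))) ((s : Int) + (c :: t).length - 1)
          = pvFirstBig (pvRuns t (s + (0 + 1))) ((s : Int) + (c :: t).length - 1) := by
        simp [pvFirstBig]
      rw [hfb]
      cases t with
      | nil =>
        have h0 : pvChain [c] = 0 := rfl
        simp [pvRuns_nil, pvFirstBig, h0]
      | cons b t2 =>
        have hb : ¬ (b == c) = true := by
          intro hbc
          have : 1 ≤ ((b :: t2).takeWhile (· == c)).length := by simp [hbc]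
          omega
        have hbc : c ≠ b := by intro h; apply hb; simp [h]
        have hF : (s : Int) + 1 ≤ pvFirstBig (pvRuns (b :: t2) (s + (0 + 1)))
            (((s + (0 + 1) : Nat) : Int) + ((b :: t2).length : Int) - 1) :=
          pvFirstBig_ge (pvRuns (b :: t2) (s + (0 + 1)))
            (((s + (0 + 1) : Nat) : Int) + ((b :: t2).length : Int) - 1) ((s : Int) + 1)
            (fun x hx => by
              have := pvRuns_start_ge (b :: t2) (s + (0 + 1)) x hx
              push_cast; omega)
            (by push_cast [List.length_cons]; omega)
        have harith : ((s + (0 + 1) : Nat) : Int) + ((b :: t2).length : Int) - 1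
            = (s : Int) + ((c :: b :: t2).length : Int) - 1 := by push_cast; simp; ring_nf
        rw [harith] at hF ih
        have hchain : pvChain (c :: b :: t2) = pvChain (b :: t2) + 1 := by
          simp [pvChain, hbc]
        rw [hchain]
        rw [max_eq_left (by omega)] at ih
        rw [max_eq_left (by push_cast at hF ⊢; omega)]
        push_cast at ih ⊢
        omega
    · have h1 : 1 ≤ (t.takeWhile (· == c)).length := by omega
      obtain ⟨t2, ht⟩ := pv_tw_head c t h1
      subst ht
      have hfb : pvFirstBig ((c, k + 1, s) :: pvRuns (List.drop k (c :: t2)) (s + (k + 1)))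
          ((s : Int) + (c :: c :: t2).length - 1) = (s : Int) := by
        simp only [pvFirstBig, show 2 ≤ k + 1 by omega, if_true]
      rw [hfb]
      have hchain : pvChain (c :: c :: t2) = 0 := by simp [pvChain]
      rw [hchain]
      simp

-- pvTrim on run lists --------------------------------------------------
theorem pvTrim_id (l : List Char) (s j : Nat) : j ≤ s → pvTrim (pvRuns l s) j = pvRuns l s := by
  fun_induction pvRuns l s with
  | case1 s => intro _; rfl
  | case2 s c t k ih =>
    intro h
    rw [pvTrim]
    have h1 : ¬ s + (k + 1) ≤ j := by omega
    have h2 : ¬ s < j := by omega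
    simp only [h1, h2, if_false]
    rw [ih (by omega)]

theorem pvRuns_drop_inside (c : Char) (t : List Char) (d s : Nat)
    (h : d ≤ (t.takeWhile (· == c)).length) :
    pvRuns ((c :: t).drop d) (s + d) =
      (c, (t.takeWhile (· == c)).length + 1 - d, s + d) ::
        pvRuns (t.drop (t.takeWhile (· == c)).length)
          (s + ((t.takeWhile (· == c)).length + 1)) := by
  induction d generalizing t s with
  | zero => simpa using pvRuns_cons c t s
  | succ d ihd =>
    obtain ⟨t2, ht⟩ := pv_tw_head c t (by omega)
    subst ht
    have hk : ((c :: t2).takeWhile (· == c)).length = (t2.takeWhile (· == c)).length + 1 := by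
      simp []
    rw [hk] at h ⊢
    have hd2 : d ≤ (t2.takeWhile (· == c)).length := by omega
    have := ihd t2 (s + 1) hd2
    have hdrop : (c :: c :: t2).drop (d + 1) = (c :: t2).drop d := by simp
    have hs : s + 1 + d = s + (d + 1) := by omega
    rw [hdrop]
    rw [hs] at this
    rw [this]
    have h1 : (t2.takeWhile (· == c)).length + 1 - d = (t2.takeWhile (· == c)).length + 1 + 1 - (d + 1) := by omega
    have h2 : s + 1 + ((t2.takeWhile (· == c)).length + 1) = s + ((t2.takeWhile (· == c)).length + 1 + 1) := by omega
    have h3 : (c :: t2).drop ((t2.takeWhile (· == c)).length + 1) = t2.drop (t2.takeWhile (· == c)).length := by simp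
    rw [h1, h2, h3]

theorem pvTrim_runs (n : Nat) (l : List Char) (s j : Nat) (hn : l.length ≤ n) (hsj : s ≤ j) :
    pvTrim (pvRuns l s) j = pvRuns (l.drop (j - s)) j := by
  induction n generalizing l s with
  | zero =>
    have : l = [] := by cases l <;> simp_all
    subst this; simp [pvRuns, pvTrim]
  | succ n ihn =>
    cases l with
    | nil => simp [pvRuns, pvTrim]
    | cons c t =>
      rw [pvRuns_cons, pvTrim]
      set k := (t.takeWhile (· == c)).length with hk
      clear_value k
      have hkt : k ≤ t.length := by rw [hk]; exact (List.takeWhile_prefix _).length_le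
      rcases Nat.lt_or_ge j (s + (k + 1)) with hj | hj
      · have h1 : ¬ s + (k + 1) ≤ j := by omega
        simp only [h1, if_false]
        rcases Nat.eq_or_lt_of_le hsj with he | hlt
        · subst he
          have h2 : ¬ s < s := by omega
          simp only [h2, if_false]
          rw [pvTrim_id _ _ _ (by omega)]
          simp [pvRuns_cons, hk]
        · simp only [hlt, if_true]
          rw [pvTrim_id _ _ _ (by omega)]
          have hd : j - s ≤ k := by omega
          have := pvRuns_drop_inside c t (j - s) s (by omega)
          rw [show s + (j - s) = j by omega] at this
          rw [this, ← hk]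
          have harith : s + (k + 1) - j = k + 1 - (j - s) := by omega
          rw [harith]
      · simp only [hj, if_true]
        have hlen : (t.drop k).length ≤ n := by
          simp only [List.length_drop]
          simp at hn; omega
        rw [ihn (t.drop k) (s + (k + 1)) hlen (by omega)]
        congr 1
        rw [List.drop_drop]
        have : (c :: t).drop (j - s) = t.drop (j - s - 1) := by
          cases hjs : j - s with
          | zero => omega
          | succ m => simp []
        rw [this]
        congr 1
        omega

-- pvBPairs shape lemmas ------------------------------------------------
theorem pvBPairs_nil : pvBPairs [] = [] := by simp [pvBPairs.eq_def]

theorem pvBPairs_cons_not1 (v : Char) (len st : Nat) (rs : List (Char × Nat × Nat))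
    (h : v ≠ '1') : pvBPairs ((v, len, st) :: rs) = pvBPairs rs := by
  rw [pvBPairs.eq_def]; simp [h]

theorem pvBPairs_one_nil (len st : Nat) : pvBPairs [('1', len, st)] = [(st, len, 0, len)] := by
  rw [pvBPairs.eq_def]; simp

theorem pvBPairs_one_zero (len st len2 s2 : Nat) (rs : List (Char × Nat × Nat)) :
    pvBPairs (('1', len, st) :: ('0', len2, s2) :: rs)
      = (st, len, len2, len + len2) :: pvBPairs rs := by
  rw [pvBPairs.eq_def]; simp

theorem pvBPairs_one_other (v2 : Char) (len st len2 s2 : Nat) (rs : List (Char × Nat × Nat))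
    (h0 : v2 ≠ '0') : pvBPairs (('1', len, st) :: (v2, len2, s2) :: rs)
      = (st, len, 0, len) :: pvBPairs ((v2, len2, s2) :: rs) := by
  rw [pvBPairs.eq_def]; simp [h0]

-- A's pulse-pair loop = pairing of the runs -----------------------------
theorem pvAPairs_runs (l : List Char) (i : Nat) :
    pvAPairs l i = pvBPairs (pvRuns (l.drop i) i) := by
  fun_induction pvAPairs l i with
  | case1 i h hc ih =>
    have hdrop : l.drop i = l[i] :: l.drop (i+1) := List.drop_eq_getElem_cons h
    have hc' : l[i] ≠ '1' := by rwa [List.getD_eq_getElem l ' ' h] at hc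
    rw [hdrop, pvRuns_cons, pvBPairs_cons_not1 _ _ _ _ hc']
    rw [ih]
    by_cases hk : ((l.drop (i+1)).takeWhile (· == l[i])).length = 0
    · rw [hk]; simp
    · obtain ⟨t2, ht⟩ := pv_tw_head l[i] (l.drop (i+1)) (by omega)
      rw [ht] at hk ⊢
      have hk2 : ((l[i] :: t2).takeWhile (· == l[i])).length
          = (t2.takeWhile (· == l[i])).length + 1 := by simp []
      rw [hk2, pvRuns_cons, pvBPairs_cons_not1 _ _ _ _ hc']
      rw [List.drop_succ_cons]
      congr 2
      omega
  | case2 i h hc hiEnd loEnd ih =>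
    have hHidef : hiEnd = pvAWhileEq '1' l i := rfl
    have hLodef : loEnd = pvAWhileEq '0' l hiEnd := rfl
    clear_value hiEnd loEnd
    simp only [ne_eq, not_not] at hc
    have hc1 : l[i] = '1' := by rwa [List.getD_eq_getElem l ' ' h] at hc
    have hdrop : l.drop i = l[i] :: l.drop (i+1) := List.drop_eq_getElem_cons h
    have htw : ((l.drop i).takeWhile (· == '1')).length
        = ((l.drop (i+1)).takeWhile (· == '1')).length + 1 := by
      rw [hdrop, hc1]; simp []
    generalize hk1 : ((l.drop (i+1)).takeWhile (· == '1')).length = k1 at htw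
    have hHi : hiEnd = i + (k1 + 1) := by rw [hHidef, pvAWhileEq_eq, htw]
    have hd : l.drop (i + (k1 + 1)) = (l.drop (i+1)).drop k1 := by
      rw [List.drop_drop]; congr 1; omega
    have hruns : pvRuns (l.drop i) i
        = ('1', k1 + 1, i) :: pvRuns ((l.drop (i+1)).drop k1) (i + (k1 + 1)) := by
      rw [hdrop, hc1, pvRuns_cons, hk1]
    cases htd : (l.drop (i+1)).drop k1 with
    | nil =>
      have hLo : loEnd = i + (k1 + 1) := by
        rw [hLodef, pvAWhileEq_eq, hHi, hd, htd]; simp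
      rw [hruns, htd, pvRuns_nil, pvBPairs_one_nil]
      rw [ih, hLo, hHi]
      have hnil : l.drop (i + (k1 + 1)) = [] := by rw [hd, htd]
      rw [hnil, pvRuns_nil, pvBPairs_nil]
      have e1 : i + (k1 + 1) - i = k1 + 1 := by omega
      rw [e1]; simp
    | cons c2 t2 =>
      have hc2 : ¬ (c2 == '1') = true := by
        apply pv_head_after_tw (· == '1') (l.drop i) c2 t2
        rw [htw, List.drop_drop]
        rw [hd, htd]
      have hc2' : c2 ≠ '1' := by simpa using hc2
      have hruns2 : pvRuns ((l.drop (i+1)).drop k1) (i + (k1 + 1))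
          = (c2, (t2.takeWhile (· == c2)).length + 1, i + (k1 + 1)) ::
            pvRuns (t2.drop (t2.takeWhile (· == c2)).length)
              (i + (k1 + 1) + ((t2.takeWhile (· == c2)).length + 1)) := by
        rw [htd, pvRuns_cons]
      generalize hk2 : (t2.takeWhile (· == c2)).length = k2 at hruns2
      by_cases hz : c2 = '0'
      · subst hz
        have hlotw : ((l.drop (i + (k1 + 1))).takeWhile (· == '0')).length = k2 + 1 := by
          rw [hd, htd]; simp [hk2]
        have hLo : loEnd = i + (k1 + 1) + (k2 + 1) := by
          rw [hLodef, pvAWhileEq_eq, hHi, hlotw]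
        rw [hruns, hruns2, pvBPairs_one_zero]
        rw [ih, hLo, hHi]
        have hdl : l.drop (i + (k1 + 1) + (k2 + 1)) = t2.drop k2 := by
          have h1 : l.drop (i + (k1 + 1) + (k2 + 1)) = (l.drop (i + (k1 + 1))).drop (k2 + 1) := by
            rw [List.drop_drop]
          rw [h1, hd, htd, List.drop_succ_cons]
        rw [hdl]
        have e1 : i + (k1 + 1) - i = k1 + 1 := by omega
        have e2 : i + (k1 + 1) + (k2 + 1) - (i + (k1 + 1)) = k2 + 1 := by omega
        rw [e1, e2]
      · have hzb : (c2 == '0') = false := by simp [hz]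
        have hlotw : ((l.drop (i + (k1 + 1))).takeWhile (· == '0')).length = 0 := by
          rw [hd, htd]; simp [hzb]
        have hLo : loEnd = i + (k1 + 1) := by
          rw [hLodef, pvAWhileEq_eq, hHi, hlotw]
          omega
        rw [hruns, hruns2, pvBPairs_one_other _ _ _ _ _ _ hz]
        rw [ih, hLo, hHi]
        have hct : l.drop (i + (k1 + 1)) = c2 :: t2 := by rw [hd, htd]
        rw [hct, pvRuns_cons, hk2]
        have e1 : i + (k1 + 1) - i = k1 + 1 := by omega
        rw [e1]; simp
  | case3 i h =>
    have hnil : l.drop i = [] := List.drop_eq_nil_of_le (by omega)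
    rw [hnil, pvRuns_nil, pvBPairs_nil]

-- dominant period: fold over items (A) = fold over keys with lookups (B) --
theorem pvFoldMax_aux (F : Nat → Int) (its : List (Nat × Int)) :
    ∀ (b : Nat × Int), (∀ kv ∈ its, F kv.1 = kv.2) → F b.1 = b.2 →
    (its.foldl (fun best kv => if kv.2 > best.2 then kv else best) b).1
      = (its.map Prod.fst).foldl (fun best k => if F k > F best then k else best) b.1 := by
  induction its with
  | nil => intro b _ _; rfl
  | cons kv rest ih =>
    intro b hmem hb
    simp only [List.foldl_cons, List.map_cons]
    have hkv : F kv.1 = kv.2 := hmem kv (by simp)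
    by_cases hgt : kv.2 > b.2
    · rw [if_pos hgt, if_pos (by rw [hkv, hb]; exact hgt)]
      exact ih kv (fun x hx => hmem x (by simp [hx])) hkv
    · rw [if_neg hgt, if_neg (by rw [hkv, hb]; exact hgt)]
      exact ih b (fun x hx => hmem x (by simp [hx])) hb

theorem pvMost_eq (d : PySem.Dict Nat Int) (hnd : d.keys.Nodup) :
    pvAMostCommon d = pvBMax d := by
  unfold pvAMostCommon pvBMax
  have hkeys : d.keys = d.items.map Prod.fst := rfl
  cases hit : d.items with
  | nil => rw [hkeys, hit]; rfl
  | cons it rest =>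
    rw [hkeys, hit]
    simp only [List.map_cons]
    have hF : ∀ kv ∈ d.items, d.getD kv.1 0 = kv.2 := by
      intro kv hkv
      have : (kv.1, kv.2) ∈ d.items := by simpa using hkv
      exact PySem.Dict.getD_of_mem_items d this hnd 0
    exact pvFoldMax_aux (fun k => d.getD k 0) rest it
      (fun x hx => hF x (by rw [hit]; simp [hx]))
      (hF it (by rw [hit]; simp))

-- the 3-consecutive scan: index loop (A) = triple-pattern recursion (B) ----
theorem pvBFind3_short (pairs : List (Nat × Nat × Nat × Nat)) (dom : Nat)
    (h : pairs.length ≤ 2) : pvBFind3 pairs dom = none := by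
  rcases pairs with _ | ⟨a, _ | ⟨b, _ | ⟨c, r⟩⟩⟩
  · rfl
  · rfl
  · rfl
  · simp at h
theorem pvBFind3_cons3 (a b c : Nat × Nat × Nat × Nat) (r : List (Nat × Nat × Nat × Nat)) (dom : Nat) :
    pvBFind3 (a :: b :: c :: r) dom
      = if a.2.2.2 = dom ∧ b.2.2.2 = dom ∧ c.2.2.2 = dom then some a.1
        else pvBFind3 (b :: c :: r) dom := rfl

theorem pvFind3_eq (pairs : List (Nat × Nat × Nat × Nat)) (dom : Nat) (j : Nat) :
    pvAFind3 pairs dom j = pvBFind3 (pairs.drop j) dom := by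
  fun_induction pvAFind3 pairs dom j with
  | case1 j h d0 hif =>
    have h0 : j < pairs.length := by omega
    have h1 : j + 1 < pairs.length := by omega
    rw [List.drop_eq_getElem_cons h0, List.drop_eq_getElem_cons h1, List.drop_eq_getElem_cons h,
      pvBFind3_cons3]
    rw [List.getD_eq_getElem pairs d0 h0, List.getD_eq_getElem pairs d0 h1,
      List.getD_eq_getElem pairs d0 h] at hif
    rw [if_pos hif, List.getD_eq_getElem pairs d0 h0]
  | case2 j h d0 hif ih =>
    have h0 : j < pairs.length := by omega
    have h1 : j + 1 < pairs.length := by omega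
    rw [List.drop_eq_getElem_cons h0, List.drop_eq_getElem_cons h1, List.drop_eq_getElem_cons h,
      pvBFind3_cons3]
    rw [List.getD_eq_getElem pairs d0 h0, List.getD_eq_getElem pairs d0 h1,
      List.getD_eq_getElem pairs d0 h] at hif
    rw [if_neg hif, ih, List.drop_eq_getElem_cons h1, List.drop_eq_getElem_cons h]
  | case3 j h =>
    rw [pvBFind3_short _ _ (by rw [List.length_drop]; omega)]

theorem pvTrim_runs0 (l : List Char) (j : Nat) :
    pvTrim (pvRuns l 0) j = pvRuns (l.drop j) j := by
  simpa using pvTrim_runs l.length l 0 j (le_refl _) (Nat.zero_le _)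

-- the common final phase: counting, dominant period, 3-consecutive scan ----
theorem pvFinal (i2 : Nat) (pairs : List (Nat × Nat × Nat × Nat)) :
    (if pairs.length < 4 then (i2 : Int)
     else
       match pvAFind3 pairs
           (pvAMostCommon (PySem.Dict.counter (pairs.map (fun p => p.2.2.2)))) 0 with
       | some r => (r : Int)
       | none =>
         match pairs.head? with
         | some p => (p.1 : Int)
         | none => (i2 : Int)) =
    (if pairs.length < 4 then (i2 : Int)
     else
       match pvBFind3 pairs (pvBMax (PySem.Dict.counter (pairs.map (fun p => p.2.2.2)))) with
       | some r => (r : Int)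
       | none => ((pairs.headD (0, 0, 0, 0)).1 : Int)) := by
  by_cases hlen : pairs.length < 4
  · simp [hlen]
  · simp only [hlen, if_false]
    rw [pvMost_eq _ (PySem.Dict.nodup_keys_counter _), pvFind3_eq, List.drop_zero]
    cases hf : pvBFind3 pairs (pvBMax (PySem.Dict.counter (pairs.map (fun p => p.2.2.2)))) with
    | some r => rfl
    | none =>
      cases pairs with
      | nil => simp at hlen
      | cons p pr => rfl

-- phase 2 onwards (zero gap, pairs, final), for an arbitrary anchor i1 -----
theorem pvStage2 (l : List Char) (i1 i1' : Nat) (hE : i1' = i1) :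
    (let i2 := i1 + ((l.drop i1).takeWhile (· == '0')).length
     let pairs := pvAPairs l i2
     if pairs.length < 4 then (i2 : Int)
     else
       match pvAFind3 pairs
           (pvAMostCommon (PySem.Dict.counter (pairs.map (fun p => p.2.2.2)))) 0 with
       | some r => (r : Int)
       | none =>
         match pairs.head? with
         | some p => (p.1 : Int)
         | none => (i2 : Int)) =
    (let tail := pvRuns (l.drop i1') i1'
     let it : Nat × List (Char × Nat × Nat) :=
       match tail with
       | (v, len, st) :: rest2 => if v = '0' then (st + len, rest2) else (i1', tail)
       | [] => (i1', tail)
     let pairs := pvBPairs it.2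
     if pairs.length < 4 then (it.1 : Int)
     else
       match pvBFind3 pairs (pvBMax (PySem.Dict.counter (pairs.map (fun p => p.2.2.2)))) with
       | some r => (r : Int)
       | none => ((pairs.headD (0, 0, 0, 0)).1 : Int)) := by
  subst hE
  cases hd : l.drop i1' with
  | nil =>
    simp only [pvRuns_nil, List.takeWhile_nil, List.length_nil, Nat.add_zero]
    rw [pvAPairs_runs, hd, pvRuns_nil, pvBPairs_nil]
    simp
  | cons c1 t1 =>
    simp only [pvRuns_cons]
    by_cases hz1 : c1 = '0'
    · subst hz1
      simp only [List.takeWhile_cons, beq_self_eq_true, if_true, List.length_cons]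
      rw [pvAPairs_runs]
      have hdd : l.drop (i1' + ((t1.takeWhile (fun x => x == '0')).length + 1))
          = t1.drop (t1.takeWhile (fun x => x == '0')).length := by
        rw [← List.drop_drop, hd, List.drop_succ_cons]
      rw [hdd]
      exact pvFinal _ _
    · have hz1b : (c1 == '0') = false := by simp [hz1]
      simp only [List.takeWhile_cons, hz1b, Bool.false_eq_true, if_false, List.length_nil,
        Nat.add_zero, if_neg hz1]
      rw [pvAPairs_runs, hd, pvRuns_cons]
      exact pvFinal _ _

-- ===== VERDICT (by name: the statement is the Claim_ definition above) =====
theorem find_pwm_data_start_py_spec : Claim_equal_find_pwm_data_start_py := by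
  intro bits _
  unfold Spec_find_pwm_data_start_py
  simp only [find_pwm_data_start_py, find_pwm_data_start_py_alt]
  generalize bits.toList = l
  by_cases hl : l = []
  · subst hl
    simp [pvRuns_nil, pvTrim, pvBPairs_nil, pvFirstBig]
  · obtain ⟨c, t, rfl⟩ := List.exists_cons_of_ne_nil hl
    rw [if_neg (List.cons_ne_nil c t)]
    simp only [pvAWhileEq_eq, pvAPs_eq, pvTrim_runs0, Nat.add_sub_cancel_left, Nat.zero_add,
      List.drop_zero]
    simp only [pvRuns_cons, Nat.zero_add]
    by_cases hc0 : c = '0'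
    · subst hc0
      simp only [List.takeWhile_cons, beq_self_eq_true, if_true, List.length_cons,
        List.drop_succ_cons, List.drop_zero]
      set tw := (t.takeWhile (· == '0')).length with htw
      have htwle : tw ≤ t.length := by rw [htw]; exact (List.takeWhile_prefix _).length_le
      have hcf := pvChain_firstBig (t.drop tw) (tw + 1)
      have harith : ((tw + 1 : Nat) : Int) + ((t.drop tw).length : Int) - 1
          = ((t.length + 1 : Nat) : Int) - 1 := by
        push_cast [List.length_drop]
        omega
      rw [harith] at hcf
      have haltB : ((max (pvFirstBig (pvRuns (t.drop tw) (tw + 1))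
            (((t.length + 1 : Nat) : Int) - 1) - ((tw + 1 : Nat) : Int)) 0)).toNat
          = pvChain (t.drop tw) := by
        rw [← hcf]; simp
      rw [haltB]
      exact pvStage2 _ _ _ rfl
    · have hc0b : (c == '0') = false := by simp [hc0]
      simp only [List.takeWhile_cons, hc0b, Bool.false_eq_true, if_false, List.length_nil,
        List.drop_zero, Nat.zero_add, if_neg hc0]
      have hcf := pvChain_firstBig (c :: t) 0
      have harith : ((0 : Nat) : Int) + ((c :: t).length : Int) - 1
          = (((c :: t).length : Nat) : Int) - 1 := by push_cast; ring
      rw [harith] at hcf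
      have haltB : ((max (pvFirstBig (pvRuns (c :: t) 0)
            ((((c :: t).length : Nat) : Int) - 1) - ((0 : Nat) : Int)) 0)).toNat
          = pvChain (c :: t) := by
        rw [← hcf]; simp
      rw [pvRuns_cons] at haltB
      simp only [Nat.zero_add] at haltB
      rw [haltB]
      exact pvStage2 _ _ _ rfl
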